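-- pv_equiv track=rewrite | github.com/Darudeboy/refactoring_ai | release_pr_status.py | _looks_like_pr
-- ===== SOURCE A (Python) =====
-- def _looks_like_pr(text: str) -> bool:
--     value = (text or "").lower()
--     markers = (
--         "pull request",
--         "pull-request",
--         "merge request",
--         "/pull/",
--         "/pulls/",
--         "/merge_requests/",
--         "bitbucket.org",
--         "github.com",
--         "gitlab",
--     )
--     return any(marker in value for marker in markers)
-- ===== SOURCE B (Python) =====
-- _MARKERS = ["pull request", "pull-request", "merge request", "/pull/", "/pulls/",
--             "/merge_requests/", "bitbucket.org", "github.com", "gitlab"]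
--
--
-- def _looks_like_pr(text: str) -> bool:
--     # single left-to-right scan of the lowered text: at each position,
--     # test whether some marker starts there (naive multi-pattern matcher)
--     value = text.lower() if text else ""
--     for i in range(len(value)):
--         tail = value[i:]
--         if any(tail.startswith(m) for m in _MARKERS):
--             return True
--     return False
-- ===== Notes on version B (the rewrite author's own statement) =====
-- stated objective: alternative
-- what changed: Replaced the per-marker substring searches (one full scan of the text per marker) by a single left-to-right scan of the lowered text that at each position checks whether any marker starts there (startswith), like a naive multi-pattern matcher.
import Mathlib
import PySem

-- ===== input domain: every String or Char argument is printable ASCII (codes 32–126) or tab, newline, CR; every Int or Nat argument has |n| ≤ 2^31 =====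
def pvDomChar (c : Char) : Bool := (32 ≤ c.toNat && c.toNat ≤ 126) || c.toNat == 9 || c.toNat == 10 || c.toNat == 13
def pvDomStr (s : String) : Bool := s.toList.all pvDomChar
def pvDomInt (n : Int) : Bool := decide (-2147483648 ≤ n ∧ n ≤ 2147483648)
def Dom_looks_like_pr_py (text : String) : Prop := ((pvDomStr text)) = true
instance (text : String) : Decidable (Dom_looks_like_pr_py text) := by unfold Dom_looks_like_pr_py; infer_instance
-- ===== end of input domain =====

-- B replaces A's per-marker substring searches by one left-to-right scan of the
-- lowered text testing at each position whether some marker starts there (alternative decomposition, same cost).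

-- the shared marker tuple, as lists of characters
def pvMarkers : List (List Char) :=
  ["pull request".toList, "pull-request".toList, "merge request".toList,
   "/pull/".toList, "/pulls/".toList, "/merge_requests/".toList,
   "bitbucket.org".toList, "github.com".toList, "gitlab".toList]

-- ===== PORT A =====
-- value = (text or "").lower(): for a str argument, 'text or ""' is text itself ("" stays "")
def looks_like_pr_py (text : String) : Bool :=
  let value := PySem.Chars.lower text.toList
  pvMarkers.any (fun marker => PySem.Chars.isIn marker value)

-- ===== PORT B =====
-- B's scan: at each suffix (position i, tail = value[i:]) test startswith for every marker
def pvScan (value : List Char) : Bool :=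
  match value with
  | [] => false
  | c :: rest =>
      pvMarkers.any (fun m => PySem.Chars.startswith (c :: rest) m) || pvScan rest

def looks_like_pr_py_alt (text : String) : Bool :=
  pvScan (PySem.Chars.lower text.toList)

-- ===== PRECONDITION & SPEC =====
def Spec_looks_like_pr_py (text : String) (out : Bool) : Prop := out = looks_like_pr_py_alt text
instance (text : String) (out : Bool) : Decidable (Spec_looks_like_pr_py text out) := by unfold Spec_looks_like_pr_py; infer_instance

-- ===== CLAIM (what is proved, stated in full; the proofs are below) =====
def Claim_equal_looks_like_pr_py : Prop := ∀ (text : String), Dom_looks_like_pr_py text → Spec_looks_like_pr_py text (looks_like_pr_py text)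

-- ===== LEMMAS AND PROOFS =====

-- B's position scan finds a marker iff some marker is a substring (markers are nonempty)
theorem pvScan_eq_any_isIn (v : List Char) :
    pvScan v = pvMarkers.any (fun m => PySem.Chars.isIn m v) := by
  induction v with
  | nil =>
      simp [pvScan, PySem.Chars.isIn_iff_infix]
      intro m hm
      fin_cases hm <;> simp
  | cons c rest ih =>
      rw [pvScan, ih, Bool.eq_iff_iff]
      simp only [Bool.or_eq_true, List.any_eq_true, PySem.Chars.isIn_iff_infix,
        PySem.Chars.startswith_iff, List.infix_cons_iff]
      constructor
      · rintro (⟨m, hm, hp⟩ | ⟨m, hm, hi⟩)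
        · exact ⟨m, hm, Or.inl hp⟩
        · exact ⟨m, hm, Or.inr hi⟩
      · rintro ⟨m, hm, hp | hi⟩
        · exact Or.inl ⟨m, hm, hp⟩
        · exact Or.inr ⟨m, hm, hi⟩

-- ===== VERDICT (by name: the statement is the Claim_ definition above) =====
theorem looks_like_pr_py_spec : Claim_equal_looks_like_pr_py := by
  intro text _
  unfold Spec_looks_like_pr_py looks_like_pr_py looks_like_pr_py_alt
  rw [pvScan_eq_any_isIn]
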